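-- pv_equiv track=rewrite | github.com/ihmeuw/gbd_mapping | src/gbd_mapping_generator/util.py | make_slots
-- ===== SOURCE A (Python) =====
-- from typing import Union, Tuple, List, Dict, Any
--
-- TEXTWIDTH = 118  # type: int
--
-- TAB = '    '  # type: str
--
-- def make_slots(field_list: List[str]) -> str:
--     """Generate explicit object attributes using slots (instead of dict).
--
--     Parameters
--     ----------
--     field_list
--         Names for the slot attributes.
--
--     Returns
--     -------
--     str
--         String representation of slot attributes.
--
--     """
--     declaration = TAB + '__slots__ = ('
--     offset = len(declaration)
--
--     out = declaration
--     char_count = offset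
--
--     for field in field_list:
--         field = f"'{field}', "
--         field_width = len(field)
--         if char_count == offset:
--             out += field
--             char_count += field_width
--         elif char_count + field_width > TEXTWIDTH:
--             out = out[:-1] + '\n' + ' '*offset + field
--             char_count = offset + field_width
--         else:
--             out += field
--             char_count += field_width
--
--     out += ')\n\n'
--
--     return out
-- ===== SOURCE B (Python) =====
-- TEXTWIDTH = 118
-- TAB = '    '
--
-- def make_slots(field_list):
--     """Build the wrapped __slots__ declaration by first partitioning the
--     rendered fields into lines, then formatting in a second pass."""
--     declaration = TAB + '__slots__ = ('
--     offset = len(declaration)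
--
--     rendered = [f"'{field}', " for field in field_list]
--
--     lines = []        # completed (wrapped) lines, each a list of rendered fields
--     current = []      # fields of the line being filled
--     char_count = offset
--     for field in rendered:
--         w = len(field)
--         if current and char_count + w > TEXTWIDTH:
--             lines.append(current)
--             current = [field]
--             char_count = offset + w
--         else:
--             current.append(field)
--             char_count += w
--
--     body_lines = [''.join(line)[:-1] for line in lines] + \
--                  ([''.join(current)] if current else [])
--     sep = '\n' + ' ' * offset
--     return declaration + sep.join(body_lines) + ')\n\n'
-- ===== Notes on version B (the rewrite author's own statement) =====
-- stated objective: simpler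
-- what changed: B first partitions the rendered fields into a list of lines with the greedy width accounting, then formats everything in a separate pass (strip each non-final line's trailing space, join with the newline+indent separator), instead of A's single pass that mutates the output string in place; A's wrap step re-slices the whole accumulated string (out[:-1]), which copies O(output) per wrapped line, while B only joins once.
import Mathlib
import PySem

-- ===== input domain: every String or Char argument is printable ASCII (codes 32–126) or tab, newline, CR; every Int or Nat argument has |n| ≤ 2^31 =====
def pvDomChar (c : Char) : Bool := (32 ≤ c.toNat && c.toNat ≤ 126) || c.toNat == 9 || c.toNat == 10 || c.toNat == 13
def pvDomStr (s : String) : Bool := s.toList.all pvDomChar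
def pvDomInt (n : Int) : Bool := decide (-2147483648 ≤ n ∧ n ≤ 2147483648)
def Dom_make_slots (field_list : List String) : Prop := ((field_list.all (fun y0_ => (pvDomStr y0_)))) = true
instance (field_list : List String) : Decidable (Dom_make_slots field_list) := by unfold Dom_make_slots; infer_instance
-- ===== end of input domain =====

-- B rebuilds the same greedy wrap as a partition-into-lines pass followed by a separate
-- formatting pass (join), instead of A's in-place string-and-counter mutation; objective: simpler.

-- module constants: TEXTWIDTH = 118, TAB = '    ', declaration, offset (shared by both Pythons)
def pvTEXTWIDTH : Int := 118
def pvDecl : List Char := "    __slots__ = (".toList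
def pvOffset : Int := (pvDecl.length : Int)

-- ===== PORT A =====
-- one step of A's loop: field = f"'{field}', "; out[:-1] on a string is dropLast (exact, also on the empty string)
def pvAStep (s : List Char × Int) (f : String) : List Char × Int :=
  let field := '\'' :: f.toList ++ "', ".toList
  let w : Int := (field.length : Int)
  if s.2 = pvOffset then (s.1 ++ field, s.2 + w)
  else if s.2 + w > pvTEXTWIDTH then
    (s.1.dropLast ++ '\n' :: List.replicate pvOffset.toNat ' ' ++ field, pvOffset + w)
  else (s.1 ++ field, s.2 + w)

def make_slots (field_list : List String) : String :=
  let r := field_list.foldl pvAStep (pvDecl, pvOffset)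
  String.ofList (r.1 ++ ")\n\n".toList)

-- ===== PORT B =====
def pvField (f : String) : List Char := '\'' :: f.toList ++ "', ".toList

def pvSep : List Char := '\n' :: List.replicate pvOffset.toNat ' '

-- one step of B's partition loop; state = (completed lines, current line, char_count)
def pvBStep (s : List (List (List Char)) × List (List Char) × Int) (field : List Char) :
    List (List (List Char)) × List (List Char) × Int :=
  let w : Int := (field.length : Int)
  if s.2.1 ≠ [] ∧ s.2.2 + w > pvTEXTWIDTH then (s.1 ++ [s.2.1], [field], pvOffset + w)
  else (s.1, s.2.1 ++ [field], s.2.2 + w)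

def make_slots_alt (field_list : List String) : String :=
  let rendered := field_list.map pvField
  let st := rendered.foldl pvBStep ([], [], pvOffset)
  let bodyLines := st.1.map (fun L => L.flatten.dropLast) ++
    (if st.2.1 = [] then [] else [st.2.1.flatten])
  String.ofList (pvDecl ++ List.intercalate pvSep bodyLines ++ ")\n\n".toList)

-- ===== PRECONDITION & SPEC =====
def Spec_make_slots (field_list : List String) (out : String) : Prop := out = make_slots_alt field_list
instance (field_list : List String) (out : String) : Decidable (Spec_make_slots field_list out) := by unfold Spec_make_slots; infer_instance

-- ===== CLAIM (what is proved, stated in full; the proofs are below) =====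
def Claim_equal_make_slots : Prop := ∀ (field_list : List String), Dom_make_slots field_list → Spec_make_slots field_list (make_slots field_list)

-- ===== LEMMAS AND PROOFS =====

-- the text A has accumulated, expressed through B's partition state
def pvRp (lines : List (List (List Char))) (current : List (List Char)) : List Char :=
  (lines.map (fun L => L.flatten.dropLast ++ pvSep)).flatten ++ current.flatten

lemma pvField_ne (f : String) : pvField f ≠ [] := by simp [pvField]

lemma flatten_ne {current : List (List Char)} (hc : current ≠ [])
    (hm : ∀ c ∈ current, c ≠ []) : current.flatten ≠ [] := by
  cases current with
  | nil => exact absurd rfl hc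
  | cons c cs =>
    have : c ≠ [] := hm c (by simp)
    cases c with
    | nil => exact absurd rfl this
    | cons a as => simp

-- the simulation invariant: from corresponding states, A's fold and B's fold stay in step
lemma pvSim (fs : List String) : ∀ (lines : List (List (List Char))) (current : List (List Char)),
    current ≠ [] → (∀ c ∈ current, c ≠ []) →
    (fs.foldl pvAStep (pvDecl ++ pvRp lines current, pvOffset + (current.flatten.length : Int))
      = (pvDecl ++ pvRp ((fs.map pvField).foldl pvBStep (lines, current, pvOffset + (current.flatten.length : Int))).1
          ((fs.map pvField).foldl pvBStep (lines, current, pvOffset + (current.flatten.length : Int))).2.1,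
         pvOffset + ((((fs.map pvField).foldl pvBStep (lines, current, pvOffset + (current.flatten.length : Int))).2.1.flatten.length : Int))))
    ∧ ((fs.map pvField).foldl pvBStep (lines, current, pvOffset + (current.flatten.length : Int))).2.1 ≠ []
    ∧ (∀ c ∈ ((fs.map pvField).foldl pvBStep (lines, current, pvOffset + (current.flatten.length : Int))).2.1, c ≠ []) := by
  induction fs with
  | nil => intro lines current hc hm; exact ⟨rfl, hc, hm⟩
  | cons f fs ih =>
    intro lines current hc hm
    have hflat : current.flatten ≠ [] := flatten_ne hc hm
    have hlen : (0:Int) < (current.flatten.length : Int) := by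
      have := List.length_pos_iff.mpr hflat; exact_mod_cast this
    by_cases hw : pvOffset + (current.flatten.length : Int) + ((pvField f).length : Int) > pvTEXTWIDTH
    · -- wrap step on both sides
      have hA : pvAStep (pvDecl ++ pvRp lines current, pvOffset + (current.flatten.length : Int)) f
          = (pvDecl ++ pvRp (lines ++ [current]) [pvField f],
             pvOffset + (([pvField f].flatten.length : Int))) := by
        show (if pvOffset + (current.flatten.length : Int) = pvOffset then _ else _) = _
        rw [if_neg (by omega), if_pos (by simpa [pvField] using hw)]
        simp only [Prod.mk.injEq]
        refine ⟨?_, by simp [pvField]⟩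
        rw [List.dropLast_append_of_ne_nil (by simp [pvRp, hflat]),
            show pvRp lines current = (lines.map (fun L => L.flatten.dropLast ++ pvSep)).flatten ++ current.flatten from rfl,
            List.dropLast_append_of_ne_nil hflat]
        simp [pvRp, pvSep, pvField]
      have hB : pvBStep (lines, current, pvOffset + (current.flatten.length : Int)) (pvField f)
          = (lines ++ [current], [pvField f], pvOffset + (([pvField f].flatten.length : Int))) := by
        show (if _ ∧ _ then _ else _) = _
        rw [if_pos ⟨hc, hw⟩]
        simp
      simp only [List.map_cons, List.foldl_cons]
      rw [hA, hB]
      exact ih (lines ++ [current]) [pvField f] (by simp) (by simpa using pvField_ne f)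
    · -- append step on both sides
      have hA : pvAStep (pvDecl ++ pvRp lines current, pvOffset + (current.flatten.length : Int)) f
          = (pvDecl ++ pvRp lines (current ++ [pvField f]),
             pvOffset + (((current ++ [pvField f]).flatten.length : Int))) := by
        show (if pvOffset + (current.flatten.length : Int) = pvOffset then _ else _) = _
        rw [if_neg (by omega), if_neg (by simpa [pvField] using hw)]
        simp only [Prod.mk.injEq]
        constructor
        · simp [pvRp, pvField]
        · simp [pvField]; ring
      have hB : pvBStep (lines, current, pvOffset + (current.flatten.length : Int)) (pvField f)
          = (lines, current ++ [pvField f],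
             pvOffset + (((current ++ [pvField f]).flatten.length : Int))) := by
        show (if _ ∧ _ then _ else _) = _
        rw [if_neg (by intro h; exact hw h.2)]
        simp only [Prod.mk.injEq]
        refine ⟨trivial, trivial, ?_⟩
        simp
        ring
      simp only [List.map_cons, List.foldl_cons]
      rw [hA, hB]
      refine ih lines (current ++ [pvField f]) (by simp) ?_
      intro c hcm
      rcases List.mem_append.mp hcm with h | h
      · exact hm c h
      · have : c = pvField f := by simpa using h
        rw [this]; exact pvField_ne f

theorem intercalate_append_singleton (sep y : List Char) : ∀ (xs : List (List Char)),
    List.intercalate sep (xs ++ [y]) = (xs.map (fun l => l ++ sep)).flatten ++ y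
  | [] => by simp [List.intercalate]
  | x :: xs => by
    have h : (x :: xs) ++ [y] = x :: (xs ++ [y]) := rfl
    obtain ⟨z, zs, hz⟩ : ∃ z zs, xs ++ [y] = z :: zs := by
      cases xs <;> exact ⟨_, _, rfl⟩
    rw [h, List.intercalate, hz, List.intersperse_cons₂, ← hz, List.flatten_cons, List.flatten_cons,
        ← List.intercalate, intercalate_append_singleton sep y xs]
    simp

-- ===== VERDICT (by name: the statement is the Claim_ definition above) =====
theorem make_slots_spec : Claim_equal_make_slots := by
  intro field_list _hdom
  show make_slots field_list = make_slots_alt field_list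
  cases field_list with
  | nil => rfl
  | cons f fs =>
    simp only [make_slots, make_slots_alt, List.map_cons, List.foldl_cons]
    have hA1 : pvAStep (pvDecl, pvOffset) f
        = (pvDecl ++ pvRp [] [pvField f], pvOffset + (([pvField f].flatten.length : Int))) := by
      simp [pvAStep, pvRp, pvField]
    have hB1 : pvBStep ([], [], pvOffset) (pvField f)
        = ([], [pvField f], pvOffset + (([pvField f].flatten.length : Int))) := by
      simp [pvBStep]
    rw [hA1, hB1]
    obtain ⟨heq, hne, -⟩ := pvSim fs [] [pvField f] (by simp) (by simpa using pvField_ne f)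
    rw [heq]
    congr 1
    rw [if_neg hne, intercalate_append_singleton]
    simp [pvRp, Function.comp_def]
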